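-- pv_equiv track=rewrite | github.com/JelinR/Google_Foobar_Challenge | Google Challenge 2.2.py | solution
-- ===== SOURCE A (Python) =====
-- def solution(x_limit, y_limit):
--     x_series = [1]
--     x_val = 1
--
--     for i in range(x_limit - 1):
--         x_val = x_val + i + 2
--         x_series.append(x_val)
--
--     y_val = x_series[-1]
--     y_series = [y_val]
--
--     for j in range(y_limit - 1):
--         y_val = y_val + j + x_limit
--         y_series.append(y_val)
--
--     return str(y_series[-1])
-- ===== SOURCE B (Python) =====
-- def solution(x_limit, y_limit):
--     n = max(x_limit - 1, 0)
--     m = max(y_limit - 1, 0)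
--     x_final = 1 + n * (n + 3) // 2
--     return str(x_final + m * (m - 1) // 2 + m * x_limit)
-- ===== Notes on version B (the rewrite author's own statement) =====
-- stated objective: faster
-- what changed: Replaces the two O(x_limit)+O(y_limit) accumulation loops (which also build the full series lists) by closed-form arithmetic-series formulas evaluated in O(1).
import Mathlib
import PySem

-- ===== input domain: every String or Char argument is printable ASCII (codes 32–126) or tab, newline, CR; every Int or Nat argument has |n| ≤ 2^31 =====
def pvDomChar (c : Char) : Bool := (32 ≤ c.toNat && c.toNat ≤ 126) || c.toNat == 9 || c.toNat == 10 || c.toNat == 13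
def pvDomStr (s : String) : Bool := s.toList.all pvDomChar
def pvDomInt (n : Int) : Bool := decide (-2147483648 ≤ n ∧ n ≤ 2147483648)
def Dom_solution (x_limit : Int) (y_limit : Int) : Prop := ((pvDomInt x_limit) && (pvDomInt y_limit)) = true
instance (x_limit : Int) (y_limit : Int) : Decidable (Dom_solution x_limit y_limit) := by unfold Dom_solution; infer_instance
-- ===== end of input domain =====

-- B replaces A's two accumulation loops with closed-form arithmetic-series sums (O(1) instead of O(x_limit+y_limit)).

-- ===== PORT A =====
-- literal port: both loops carry the (series list, current value) state exactly as A does; the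
-- series list is kept in REVERSE (cons instead of append, so evaluation stays linear), hence
-- A's series[-1] is element 0 here: PySem.List.pyGetD … 0 0 (never out of range: lists non-empty).
def solution (x_limit : Int) (y_limit : Int) : String :=
  let xState := (PySem.List.pyRange 0 (x_limit - 1) 1).foldl
    (fun (s : List Int × Int) i => ((s.2 + i + 2) :: s.1, s.2 + i + 2)) ([1], 1)
  let yVal0 := PySem.List.pyGetD xState.1 0 0
  let yState := (PySem.List.pyRange 0 (y_limit - 1) 1).foldl
    (fun (s : List Int × Int) j => ((s.2 + j + x_limit) :: s.1, s.2 + j + x_limit)) ([yVal0], yVal0)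
  PySem.Int.toStr (PySem.List.pyGetD yState.1 0 0)

-- ===== PORT B =====
def solution_alt (x_limit : Int) (y_limit : Int) : String :=
  let n := max (x_limit - 1) 0
  let m := max (y_limit - 1) 0
  let x_final := 1 + PySem.Int.floordiv (n * (n + 3)) 2
  PySem.Int.toStr (x_final + PySem.Int.floordiv (m * (m - 1)) 2 + m * x_limit)

-- ===== PRECONDITION & SPEC =====
def Spec_solution (x_limit : Int) (y_limit : Int) (out : String) : Prop := out = solution_alt x_limit y_limit
instance (x_limit : Int) (y_limit : Int) (out : String) : Decidable (Spec_solution x_limit y_limit out) := by unfold Spec_solution; infer_instance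

-- ===== CLAIM (what is proved, stated in full; the proofs are below) =====
def Claim_equal_solution : Prop := ∀ (x_limit : Int) (y_limit : Int), Dom_solution x_limit y_limit → Spec_solution x_limit y_limit (solution x_limit y_limit)

-- ===== LEMMAS AND PROOFS =====

-- the snd of the series-fold is the fold of the value alone
theorem foldl_app_snd (g : Int → Int → Int) (l : List Int) : ∀ (xs : List Int) (v : Int),
    (l.foldl (fun (s : List Int × Int) i => (g s.2 i :: s.1, g s.2 i)) (xs, v)).2 = l.foldl g v := by
  induction l with
  | nil => intro xs v; rfl
  | cons a t ih => intro xs v; simp only [List.foldl_cons]; exact ih _ _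

-- the head of the (reversed) series list is the current value
theorem foldl_app_last (g : Int → Int → Int) (l : List Int) : ∀ (xs : List Int) (v : Int),
    PySem.List.pyGetD xs 0 0 = v →
    PySem.List.pyGetD (l.foldl (fun (s : List Int × Int) i => (g s.2 i :: s.1, g s.2 i)) (xs, v)).1 0 0
      = (l.foldl (fun (s : List Int × Int) i => (g s.2 i :: s.1, g s.2 i)) (xs, v)).2 := by
  induction l with
  | nil => intro xs v h; exact h
  | cons a t ih =>
    intro xs v h
    simp only [List.foldl_cons]
    exact ih _ _ (PySem.List.pyGetD_zero_cons _ _ _)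

-- range over any Int bound equals the range over its toNat
theorem pyRange_toNat (b : Int) : PySem.List.pyRange 0 b 1 = PySem.List.pyRange 0 (b.toNat : Int) 1 := by
  rw [PySem.List.pyRange_one, PySem.List.pyRange_one]
  congr 2
  omega

-- closed form of the first loop's accumulated value
theorem xloop_value (n : Nat) : ∀ v : Int,
    2 * (PySem.List.pyRange 0 (n : Int) 1).foldl (fun v i => v + i + 2) v = 2 * v + n * (n + 3) := by
  induction n with
  | zero => intro v; simp
  | succ k ih =>
    intro v
    have h : ((k : Int) + 1) = ((k + 1 : Nat) : Int) := by push_cast; ring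
    rw [show ((k + 1 : Nat) : Int) = (k : Int) + 1 by push_cast; ring,
        PySem.List.pyRange_one_succ_right (by positivity), List.foldl_append]
    simp only [List.foldl_cons, List.foldl_nil]
    have := ih v
    ring_nf
    ring_nf at this
    omega

-- closed form of the second loop's accumulated value
theorem yloop_value (c : Int) (m : Nat) : ∀ v : Int,
    2 * (PySem.List.pyRange 0 (m : Int) 1).foldl (fun v j => v + j + c) v = 2 * v + m * (m - 1) + 2 * (m * c) := by
  induction m with
  | zero => intro v; simp
  | succ k ih =>
    intro v
    rw [show ((k + 1 : Nat) : Int) = (k : Int) + 1 by push_cast; ring,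
        PySem.List.pyRange_one_succ_right (by positivity), List.foldl_append]
    simp only [List.foldl_cons, List.foldl_nil]
    have := ih v
    ring_nf
    ring_nf at this
    omega

-- ===== VERDICT (by name: the statement is the Claim_ definition above) =====
theorem solution_spec : Claim_equal_solution := by
  intro x y _
  unfold Spec_solution solution solution_alt
  simp only
  rw [foldl_app_last (fun v j => v + j + x) _ _ _ (by rfl),
      foldl_app_last (fun v i => v + i + 2) _ _ _ (by rfl),
      foldl_app_snd (fun v j => v + j + x), foldl_app_snd (fun v i => v + i + 2),
      pyRange_toNat (x - 1), pyRange_toNat (y - 1)]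
  set n : Nat := (x - 1).toNat with hn
  set m : Nat := (y - 1).toNat with hm
  -- value after first loop
  have hx := xloop_value n 1
  -- value after second loop, started from the first loop's value
  have hy := yloop_value x m ((PySem.List.pyRange 0 (n : Int) 1).foldl (fun v i => v + i + 2) 1)
  -- evenness facts for the closed-form floor divisions
  have hmax1 : max (x - 1) 0 = (n : Int) := by omega
  have hmax2 : max (y - 1) 0 = (m : Int) := by omega
  rw [hmax1, hmax2]
  congr 1
  rw [PySem.Int.floordiv_eq_ediv_of_pos (by norm_num), PySem.Int.floordiv_eq_ediv_of_pos (by norm_num)]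
  obtain ⟨k1, hk1⟩ := Int.even_mul_succ_self (n : Int)
  obtain ⟨k2, hk2⟩ := Int.even_mul_succ_self ((m : Int) - 1)
  have e1 : (n : Int) * ((n : Int) + 3) = (k1 + k1) + 2 * n := by rw [← hk1]; ring
  have e2 : (m : Int) * ((m : Int) - 1) = k2 + k2 := by rw [← hk2]; ring
  rw [e1] at hx
  rw [e2] at hy
  omega
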